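-- pv_equiv track=rewrite | github.com/rainrelaxme/tools | modules/cm_ogpData/ogp_processor.py | split_blocks_by_label_repeat
-- ===== SOURCE A (Python) =====
-- def split_blocks_by_label_repeat(data_lines):
--     """
--     通过标签重复来拆分数据块
--     返回列表，每个元素是一个区块的数据行
--     """
--     blocks = []
--     current_block = []
--     seen_labels = set()
--     block_started = False
--
--     for line in data_lines:
--         # 解析标签
--         columns = line.strip().split('\t')
--         if not columns:
--             continue
--
--         label = columns[0].strip()
--
--         # 如果是第一次看到这个标签，或者标签重复出现
--         if label in seen_labels and block_started:
--             # 标签重复，开始新的区块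
--             blocks.append(current_block)
--             current_block = []
--             seen_labels = {label}
--             current_block.append(line)
--         else:
--             # 继续当前区块
--             current_block.append(line)
--             seen_labels.add(label)
--             block_started = True
--
--     # 添加最后一个区块
--     if current_block:
--         blocks.append(current_block)
--
--     return blocks
-- ===== SOURCE B (Python) =====
-- def split_blocks_by_label_repeat(data_lines):
--     """Greedy block scanner: each block is the longest run of lines with
--     pairwise-distinct labels; blocks are emitted as slices."""
--     def _label(line):
--         return line.strip().split('\t')[0].strip()
--
--     blocks = []
--     i, n = 0, len(data_lines)
--     while i < n:
--         seen = {_label(data_lines[i])}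
--         j = i + 1
--         while j < n and _label(data_lines[j]) not in seen:
--             seen.add(_label(data_lines[j]))
--             j += 1
--         blocks.append(data_lines[i:j])
--         i = j
--     return blocks
-- ===== Notes on version B (the rewrite author's own statement) =====
-- stated objective: alternative
-- what changed: Replaces A's single-pass accumulator (blocks/current_block/seen_labels/block_started mutated per line) with a greedy scanner that repeatedly takes the longest prefix of pairwise-distinct labels as one block and emits it as a slice.
import Mathlib
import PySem

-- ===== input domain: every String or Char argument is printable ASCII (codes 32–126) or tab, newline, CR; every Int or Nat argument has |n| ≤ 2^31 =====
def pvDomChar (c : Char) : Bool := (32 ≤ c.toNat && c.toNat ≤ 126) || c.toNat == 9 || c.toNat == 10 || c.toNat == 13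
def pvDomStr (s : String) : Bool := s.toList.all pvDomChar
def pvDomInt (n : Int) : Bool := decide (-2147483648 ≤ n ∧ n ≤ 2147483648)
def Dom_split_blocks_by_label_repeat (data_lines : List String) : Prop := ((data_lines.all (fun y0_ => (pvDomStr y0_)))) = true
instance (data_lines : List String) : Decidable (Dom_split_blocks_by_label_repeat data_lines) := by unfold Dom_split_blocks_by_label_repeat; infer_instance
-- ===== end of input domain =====

-- B replaces A's incremental block/seen/started accumulator with a greedy scanner that
-- slices off the longest distinct-label prefix per block (objective: alternative decomposition).


-- ===== PORT A =====
-- one loop iteration of A: state = (blocks, current_block, seen_labels, block_started)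
def pvAStep (st : List (List String) × List String × PySem.Set String × Bool) (line : String) :
    List (List String) × List String × PySem.Set String × Bool :=
  -- columns = line.strip().split('\t'); sep "\t" ≠ "" so split? is always `some` (getD exact)
  let columns := (PySem.Str.split? (PySem.Str.strip line) "\t").getD []
  if columns = [] then st
  else
    -- columns[0]: guarded nonempty by the branch above, so headD is exact
    let label := PySem.Str.strip (columns.headD "")
    match st with
    | (blocks, current_block, seen_labels, block_started) =>
      if seen_labels.contains label && block_started then
        (blocks ++ [current_block], [line], PySem.Set.ofList [label], block_started)
      else
        (blocks, current_block ++ [line], seen_labels.add label, true)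

def split_blocks_by_label_repeat (data_lines : List String) : List (List String) :=
  match data_lines.foldl pvAStep ([], [], PySem.Set.empty, false) with
  | (blocks, current_block, _, _) =>
      if current_block ≠ [] then blocks ++ [current_block] else blocks

-- ===== PORT B =====
-- label(line) = line.strip().split('\t')[0].strip()  ([0] never raises: split returns ≥ 1 piece)
def pvLabel (line : String) : String :=
  PySem.Str.strip (((PySem.Str.split? (PySem.Str.strip line) "\t").getD []).headD "")

-- B's inner while loop: how many further lines extend the current block (labels not yet seen)
def pvScanLen (seen : PySem.Set String) : List String → Nat
  | [] => 0
  | l :: t => if seen.contains (pvLabel l) then 0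
              else 1 + pvScanLen (seen.add (pvLabel l)) t

-- B's outer while loop: slice off one block per iteration (lines[i:j] / lines[j:] = take/drop)
def split_blocks_by_label_repeat_alt : List String → List (List String)
  | [] => []
  | l :: t =>
      let k := pvScanLen (PySem.Set.ofList [pvLabel l]) t
      (l :: t.take k) :: split_blocks_by_label_repeat_alt (t.drop k)
termination_by ls => ls.length
decreasing_by simp

-- ===== PRECONDITION & SPEC =====
def Spec_split_blocks_by_label_repeat (data_lines : List String) (out : List (List String)) : Prop := out = split_blocks_by_label_repeat_alt data_lines
instance (data_lines : List String) (out : List (List String)) : Decidable (Spec_split_blocks_by_label_repeat data_lines out) := by unfold Spec_split_blocks_by_label_repeat; infer_instance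

-- ===== CLAIM (what is proved, stated in full; the proofs are below) =====
def Claim_equal_split_blocks_by_label_repeat : Prop := ∀ (data_lines : List String), Dom_split_blocks_by_label_repeat data_lines → Spec_split_blocks_by_label_repeat data_lines (split_blocks_by_label_repeat data_lines)

-- ===== LEMMAS AND PROOFS =====
theorem pv_go_ne_nil (sep : List Char) (fuel : Nat) (l cur : List Char) (acc : List (List Char)) :
    PySem.Chars.splitOn.go sep fuel l cur acc ≠ [] := by
  induction fuel generalizing l cur acc with
  | zero => simp [PySem.Chars.splitOn.go]
  | succ f ih =>
    cases l with
    | nil => simp [PySem.Chars.splitOn.go]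
    | cons c rest =>
      rw [PySem.Chars.splitOn.go]
      split_ifs <;> exact ih _ _ _

theorem pv_columns_ne_nil (line : String) :
    ((PySem.Str.split? (PySem.Str.strip line) "\t").getD []) ≠ [] := by
  simp [PySem.Str.split?, PySem.Chars.split?, PySem.Chars.splitOn]
  intro h
  exact pv_go_ne_nil _ _ _ _ _ (by simpa using congrArg (List.map String.ofList) h)

theorem pv_alt_nil : split_blocks_by_label_repeat_alt [] = [] := by
  rw [split_blocks_by_label_repeat_alt]

theorem pv_alt_cons (l : String) (t : List String) :
    split_blocks_by_label_repeat_alt (l :: t) =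
      (l :: t.take (pvScanLen (PySem.Set.ofList [pvLabel l]) t)) ::
        split_blocks_by_label_repeat_alt (t.drop (pvScanLen (PySem.Set.ofList [pvLabel l]) t)) := by
  rw [split_blocks_by_label_repeat_alt]

-- helper name for A's finishing step
def pvFinish (st : List (List String) × List String × PySem.Set String × Bool) : List (List String) :=
  match st with
  | (blocks, current_block, _, _) =>
      if current_block ≠ [] then blocks ++ [current_block] else blocks

theorem pvAStep_eq (st : List (List String) × List String × PySem.Set String × Bool) (line : String) :
    pvAStep st line =
      (if st.2.2.1.contains (pvLabel line) && st.2.2.2 then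
        (st.1 ++ [st.2.1], [line], PySem.Set.ofList [pvLabel line], st.2.2.2)
      else (st.1, st.2.1 ++ [line], st.2.2.1.add (pvLabel line), true)) := by
  obtain ⟨b, c, s, f⟩ := st
  rw [pvAStep]
  simp only []
  rw [if_neg (pv_columns_ne_nil line)]
  rfl

theorem pv_main (t : List String) (blocks : List (List String)) (cur : List String)
    (seen : PySem.Set String) (hcur : cur ≠ []) :
    pvFinish (t.foldl pvAStep (blocks, cur, seen, true)) =
      blocks ++ (cur ++ t.take (pvScanLen seen t)) ::
        split_blocks_by_label_repeat_alt (t.drop (pvScanLen seen t)) := by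
  induction t generalizing blocks cur seen with
  | nil => simp [pvFinish, hcur, pvScanLen, pv_alt_nil]
  | cons l t ih =>
    rw [List.foldl_cons, pvAStep_eq]
    simp only []
    by_cases h : seen.contains (pvLabel l) = true
    · simp only [h, Bool.true_and, if_pos]
      rw [ih _ [l] _ (by simp)]
      rw [pvScanLen, if_pos h]
      simp only [List.take_zero, List.drop_zero]
      rw [pv_alt_cons]
      simp
    · simp only [h, Bool.false_and, if_neg, Bool.false_eq_true, not_false_iff]
      rw [ih _ _ _ (by simp [hcur])]
      rw [pvScanLen, if_neg h, Nat.add_comm]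
      simp [List.append_assoc]

-- ===== VERDICT (by name: the statement is the Claim_ definition above) =====
theorem split_blocks_by_label_repeat_spec : Claim_equal_split_blocks_by_label_repeat := by
  intro data_lines _
  unfold Spec_split_blocks_by_label_repeat
  cases data_lines with
  | nil => exact pv_alt_nil.symm
  | cons l t =>
    show pvFinish ((l :: t).foldl pvAStep ([], [], PySem.Set.empty, false)) = _
    rw [List.foldl_cons, pvAStep_eq]
    simp only [PySem.Set.contains, Bool.and_eq_true]
    rw [if_neg (by simp [PySem.Set.empty])]
    rw [pv_main _ _ _ _ (by simp), pv_alt_cons]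
    simp [PySem.Set.ofList, PySem.Set.empty]
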